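-- pv_equiv track=rewrite | github.com/kentbourgoing/ai-powered-legal-citation-analyzer | UI/app.py | get_treatment_color
-- ===== SOURCE A (Python) =====
-- def get_treatment_color(treatment_label: str) -> str:
--     if not treatment_label:
--         return "#cccccc"
--     treatment_lower = treatment_label.lower()
--
--     negative_keywords = ["negative", "NEGATIVE"]
--     if any(keyword.lower() in treatment_lower for keyword in negative_keywords):
--         return "#e74c3c"
--
--     positive_keywords = ["positive", "POSITIVE"]
--     if any(keyword.lower() in treatment_lower for keyword in positive_keywords):
--         return "#2ecc71"
--
--     neutral_keywords = ["neutral", "NEUTRAL"]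
--     if any(keyword.lower() in treatment_lower for keyword in neutral_keywords):
--         return "#fbc02d"
--
--     ambiguous_keywords = ["ambiguous", "AMBIGUOUS"]
--     if any(keyword.lower() in treatment_lower for keyword in ambiguous_keywords):
--         return "#3498db"
--
--     return "#cccccc"
-- ===== SOURCE B (Python) =====
-- def get_treatment_color(treatment_label: str) -> str:
--     if not treatment_label:
--         return "#cccccc"
--     tl = treatment_label.lower()
--     neg = pos = neu = amb = False
--     # single left-to-right scan: at each position test which keywords start there
--     for i in range(len(tl)):
--         neg = neg or tl.startswith("negative", i)
--         pos = pos or tl.startswith("positive", i)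
--         neu = neu or tl.startswith("neutral", i)
--         amb = amb or tl.startswith("ambiguous", i)
--     if neg:
--         return "#e74c3c"
--     if pos:
--         return "#2ecc71"
--     if neu:
--         return "#fbc02d"
--     if amb:
--         return "#3498db"
--     return "#cccccc"
-- ===== Notes on version B (the rewrite author's own statement) =====
-- stated objective: alternative
-- what changed: Replaces A's four sequential substring-search (`in`) branches by one left-to-right positional scan that accumulates, in a single pass over the label, four boolean flags via startswith at each offset, followed by a priority decision on the flags.
import Mathlib
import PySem

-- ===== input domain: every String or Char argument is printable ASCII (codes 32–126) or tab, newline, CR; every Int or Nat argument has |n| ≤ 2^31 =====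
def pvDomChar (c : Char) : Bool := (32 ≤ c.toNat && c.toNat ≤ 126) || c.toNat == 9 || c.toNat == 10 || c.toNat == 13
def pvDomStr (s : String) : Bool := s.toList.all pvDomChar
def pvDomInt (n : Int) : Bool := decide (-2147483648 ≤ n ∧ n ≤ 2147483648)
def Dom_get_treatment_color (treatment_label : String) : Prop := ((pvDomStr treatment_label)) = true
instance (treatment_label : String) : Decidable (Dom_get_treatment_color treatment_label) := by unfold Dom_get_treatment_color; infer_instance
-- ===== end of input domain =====

-- B replaces A's four sequential substring-search branches by one positional scan of the
-- label accumulating four match flags, then a priority decision; objective: alternative.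

-- ===== PORT A =====
def get_treatment_color (treatment_label : String) : String :=
  if treatment_label = "" then "#cccccc"
  else
    let treatment_lower := PySem.Str.lower treatment_label
    if ["negative", "NEGATIVE"].any (fun k => PySem.Str.isIn (PySem.Str.lower k) treatment_lower) then "#e74c3c"
    else if ["positive", "POSITIVE"].any (fun k => PySem.Str.isIn (PySem.Str.lower k) treatment_lower) then "#2ecc71"
    else if ["neutral", "NEUTRAL"].any (fun k => PySem.Str.isIn (PySem.Str.lower k) treatment_lower) then "#fbc02d"
    else if ["ambiguous", "AMBIGUOUS"].any (fun k => PySem.Str.isIn (PySem.Str.lower k) treatment_lower) then "#3498db"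
    else "#cccccc"

-- ===== PORT B =====
-- tl.startswith(kw, i) on 0 ≤ i is exactly: kw.toList is a prefix of tl.toList.drop i
def get_treatment_color_alt (treatment_label : String) : String :=
  if treatment_label = "" then "#cccccc"
  else
    let tl := (PySem.Str.lower treatment_label).toList
    let flags := (List.range tl.length).foldl
      (fun st i =>
        (st.1 || List.isPrefixOf "negative".toList (tl.drop i),
         st.2.1 || List.isPrefixOf "positive".toList (tl.drop i),
         st.2.2.1 || List.isPrefixOf "neutral".toList (tl.drop i),
         st.2.2.2 || List.isPrefixOf "ambiguous".toList (tl.drop i)))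
      (false, false, false, false)
    if flags.1 then "#e74c3c"
    else if flags.2.1 then "#2ecc71"
    else if flags.2.2.1 then "#fbc02d"
    else if flags.2.2.2 then "#3498db"
    else "#cccccc"

-- ===== PRECONDITION & SPEC =====
def Spec_get_treatment_color (treatment_label : String) (out : String) : Prop := out = get_treatment_color_alt treatment_label
instance (treatment_label : String) (out : String) : Decidable (Spec_get_treatment_color treatment_label out) := by unfold Spec_get_treatment_color; infer_instance

-- ===== CLAIM =====
def Claim_equal_get_treatment_color : Prop := ∀ (treatment_label : String), Dom_get_treatment_color treatment_label → Spec_get_treatment_color treatment_label (get_treatment_color treatment_label)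

-- ===== LEMMAS AND PROOFS =====
theorem lower_neg : PySem.Str.lower "NEGATIVE" = "negative" := by decide
theorem lower_pos : PySem.Str.lower "POSITIVE" = "positive" := by decide
theorem lower_neu : PySem.Str.lower "NEUTRAL" = "neutral" := by decide
theorem lower_amb : PySem.Str.lower "AMBIGUOUS" = "ambiguous" := by decide
theorem lower_neg' : PySem.Str.lower "negative" = "negative" := by decide
theorem lower_pos' : PySem.Str.lower "positive" = "positive" := by decide
theorem lower_neu' : PySem.Str.lower "neutral" = "neutral" := by decide
theorem lower_amb' : PySem.Str.lower "ambiguous" = "ambiguous" := by decide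

theorem fold_flags (l : List Nat) (p q r s : Nat → Bool) (a b c d : Bool) :
    l.foldl (fun (st : Bool × Bool × Bool × Bool) i =>
      (st.1 || p i, st.2.1 || q i, st.2.2.1 || r i, st.2.2.2 || s i)) (a, b, c, d)
    = (a || l.any p, b || l.any q, c || l.any r, d || l.any s) := by
  induction l generalizing a b c d with
  | nil => simp
  | cons x xs ih => simp [ih, Bool.or_assoc]

theorem any_prefix_eq_isIn (sub s : List Char) (h : sub ≠ []) :
    (List.range s.length).any (fun i => List.isPrefixOf sub (s.drop i)) = PySem.Chars.isIn sub s := by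
  rcases hb : PySem.Chars.isIn sub s with _ | _
  · rw [List.any_eq_false]
    intro i hi
    simp only [List.isPrefixOf_iff_prefix]
    intro hpre
    have : PySem.Chars.isIn sub s = true :=
      (PySem.Chars.exists_prefix_drop_iff_isIn _ _).mp ⟨i, hpre⟩
    simp [hb] at this
  · rw [List.any_eq_true]
    obtain ⟨j, hj⟩ := (PySem.Chars.exists_prefix_drop_iff_isIn _ _).mpr hb
    by_cases hlt : j < s.length
    · exact ⟨j, List.mem_range.mpr hlt, by simpa [List.isPrefixOf_iff_prefix] using hj⟩
    · exfalso
      have : s.drop j = [] := List.drop_eq_nil_of_le (by omega)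
      rw [this] at hj
      exact h (List.prefix_nil.mp hj)

-- ===== VERDICT =====
theorem get_treatment_color_spec : Claim_equal_get_treatment_color := by
  intro t _
  unfold Spec_get_treatment_color get_treatment_color get_treatment_color_alt
  by_cases h : t = ""
  · simp [h]
  · simp only [h, if_false, List.any_cons, List.any_nil,
      lower_neg, lower_pos, lower_neu, lower_amb,
      lower_neg', lower_pos', lower_neu', lower_amb', Bool.or_self, Bool.or_false]
    rw [fold_flags]
    simp only [Bool.false_or,
      any_prefix_eq_isIn "negative".toList _ (by decide),
      any_prefix_eq_isIn "positive".toList _ (by decide),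
      any_prefix_eq_isIn "neutral".toList _ (by decide),
      any_prefix_eq_isIn "ambiguous".toList _ (by decide),
      PySem.Str.isIn_eq]
    rfl
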